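-- pv_equiv track=rewrite | github.com/Bravcoveoko/Cryptography | ciphers/sifry.py | _mark_letters
-- ===== SOURCE A (Python) =====
-- import math
--
-- def _mark_letters(key):
--
--     ordinals = list(map(lambda x : ord(x), [*key]))
--
--     length = len(ordinals)
--     arr = [None for _ in range(length)]
--
--     mark = 1
--     for _ in range(length):
--         mIndex =  ordinals.index(min(ordinals))
--         arr[mIndex] = mark
--         mark += 1
--
--         ordinals[mIndex] = math.inf
--
--     return arr
-- ===== SOURCE B (Python) =====
-- def _mark_letters(key):
--     # Direct rank-by-counting: position i gets 1 + (# strictly smaller ordinals)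
--     # + (# equal ordinals at earlier positions); no mutable min-extraction state.
--     o = [ord(c) for c in key]
--     return [1 + sum(1 for x in o if x < o[i]) + sum(1 for x in o[:i] if x == o[i])
--             for i in range(len(o))]
-- ===== Notes on version B (the rewrite author's own statement) =====
-- stated objective: alternative
-- what changed: Replaces A's n rounds of min-extraction with an infinity sentinel and in-place marking by a stateless per-index rank computation: each mark is 1 + count of strictly smaller ordinals + count of equal ordinals at earlier positions.
import Mathlib
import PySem

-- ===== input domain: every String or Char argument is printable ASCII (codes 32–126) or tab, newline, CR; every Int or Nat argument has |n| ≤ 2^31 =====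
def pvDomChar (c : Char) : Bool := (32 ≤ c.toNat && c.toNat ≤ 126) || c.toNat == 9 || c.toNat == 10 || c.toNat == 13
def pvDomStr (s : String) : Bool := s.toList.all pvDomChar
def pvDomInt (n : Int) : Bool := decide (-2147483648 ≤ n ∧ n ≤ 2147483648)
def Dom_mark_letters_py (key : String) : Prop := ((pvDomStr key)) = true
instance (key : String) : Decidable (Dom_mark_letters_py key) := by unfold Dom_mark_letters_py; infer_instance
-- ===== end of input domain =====

-- B replaces A's repeated min-extraction with an infinity sentinel by a stateless
-- per-index rank count (strictly-smaller + equal-at-earlier-position); alternative, same O(n^2).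


-- ===== PORT A =====
-- math.inf is modeled as `none : Option Int`, ordered strictly above every integer
-- (exact here: the list holds only integer ordinals and the inf sentinel).
def ordLT : Option Int → Option Int → Bool
  | some a, some b => decide (a < b)
  | some _, none => true
  | none, _ => false

-- min(l): Python's running minimum, keeping the first minimal element.
-- Python raises ValueError on []; the loop body never calls it on an empty list,
-- so the [] branch is unreachable.
def pymin (l : List (Option Int)) : Option Int :=
  match l with
  | [] => none
  | x :: t => t.foldl (fun a b => if ordLT b a then b else a) x

-- one loop body: mIndex = ordinals.index(min(ordinals)); arr[mIndex] = mark;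
-- mark += 1; ordinals[mIndex] = math.inf.  index() always succeeds here (the
-- minimum is a member), so the getD default is never used.
def stepA (st : List (Option Int) × List Int × Int) : List (Option Int) × List Int × Int :=
  let ords := st.1
  let arr := st.2.1
  let mark := st.2.2
  let mIndex := (PySem.List.index? ords (pymin ords)).getD 0
  (ords.set mIndex none, arr.set mIndex mark, mark + 1)

def mark_letters_py (key : String) : List Int :=
  let ordinals : List (Option Int) := key.toList.map (fun c => some (c.toNat : Int))
  let length := ordinals.length
  -- Python initialises arr with None placeholders; every slot is assigned before return, so 0 stands in
  let arr : List Int := (List.range length).map (fun _ => 0)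
  let final := (List.range length).foldl (fun st _ => stepA st) (ordinals, arr, 1)
  final.2.1

-- ===== PORT B =====
def mark_letters_py_alt (key : String) : List Int :=
  let o : List Int := key.toList.map (fun c => (c.toNat : Int))
  (List.range o.length).map (fun i =>
    1 + (o.countP (fun x => x < o.getD i 0) : Int)
      + ((o.take i).countP (fun x => x == o.getD i 0) : Int))

-- ===== PRECONDITION & SPEC =====
def Spec_mark_letters_py (key : String) (out : List Int) : Prop := out = mark_letters_py_alt key
instance (key : String) (out : List Int) : Decidable (Spec_mark_letters_py key out) := by unfold Spec_mark_letters_py; infer_instance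

-- ===== CLAIM (what is proved, stated in full; the proofs are below) =====
def Claim_equal_mark_letters_py : Prop := ∀ (key : String), Dom_mark_letters_py key → Spec_mark_letters_py key (mark_letters_py key)

-- ===== LEMMAS AND PROOFS =====

-- lexicographic "strictly before" on positions: smaller ordinal, or equal ordinal and earlier
def ltb (o : List Int) (j i : Nat) : Bool :=
  o.getD j 0 < o.getD i 0 || (o.getD j 0 == o.getD i 0 && decide (j < i))

-- the number of positions strictly before i; A marks position i in round rnk o i
def rnk (o : List Int) (i : Nat) : Nat := (List.range o.length).countP (fun j => ltb o j i)

-- masked ordinal list after t rounds, and the marks array after t rounds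
def mask (o : List Int) (t : Nat) : List (Option Int) :=
  (List.range o.length).map (fun j => if rnk o j < t then none else some (o.getD j 0))

def marks (o : List Int) (t : Nat) : List Int :=
  (List.range o.length).map (fun j => if rnk o j < t then (rnk o j : Int) + 1 else 0)

theorem map_getD_range {α : Type} (l : List α) (d : α) :
    (List.range l.length).map (fun j => l.getD j d) = l := by
  apply List.ext_getElem (by simp)
  intro i h1 h2
  simp [List.getD_eq_getElem?_getD, List.getElem?_eq_getElem h2]

theorem ordLT_irrefl (a : Option Int) : ordLT a a = false := by
  cases a <;> simp [ordLT]

theorem ordLT_antisymm {a b : Option Int} (h1 : ordLT a b = false) (h2 : ordLT b a = false) :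
    a = b := by
  cases a <;> cases b <;> simp_all [ordLT] <;> omega

theorem ltb_irrefl (o : List Int) (i : Nat) : ltb o i i = false := by
  simp [ltb]

theorem ltb_total (o : List Int) {j i : Nat} (h : j ≠ i) : ltb o j i = true ∨ ltb o i j = true := by
  simp only [ltb, Bool.or_eq_true, Bool.and_eq_true, beq_iff_eq, decide_eq_true_eq]
  rcases lt_trichotomy (o.getD j 0) (o.getD i 0) with h1 | h1 | h1
  · exact Or.inl (Or.inl h1)
  · rcases Nat.lt_or_ge j i with h2 | h2
    · exact Or.inl (Or.inr ⟨h1, h2⟩)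
    · exact Or.inr (Or.inr ⟨h1.symm, lt_of_le_of_ne h2 (Ne.symm h)⟩)
  · exact Or.inr (Or.inl h1)

theorem countP_lt_of_mem {α : Type} (l : List α) (p q : α → Bool)
    (h : ∀ x ∈ l, p x = true → q x = true)
    (w : α) (hw : w ∈ l) (hq : q w = true) (hp : p w = false) :
    l.countP p < l.countP q := by
  obtain ⟨l1, l2, rfl⟩ := List.append_of_mem hw
  rw [List.countP_append, List.countP_append, List.countP_cons, List.countP_cons]
  have h1 : l1.countP p ≤ l1.countP q :=
    List.countP_mono_left (fun x hx => h x (by simp [hx]))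
  have h2 : l2.countP p ≤ l2.countP q :=
    List.countP_mono_left (fun x hx => h x (by simp [hx]))
  simp [hp, hq]
  omega

theorem rnk_lt_of_ltb (o : List Int) {j i : Nat} (hj : j < o.length)
    (h : ltb o j i = true) : rnk o j < rnk o i := by
  unfold rnk
  refine countP_lt_of_mem (List.range o.length) (fun x => ltb o x j) (fun x => ltb o x i)
    ?_ j (List.mem_range.mpr hj) h (ltb_irrefl o j)
  intro x _ hx
  simp only [ltb, Bool.or_eq_true, Bool.and_eq_true, beq_iff_eq, decide_eq_true_eq] at hx h ⊢
  rcases hx with hx | ⟨hx1, hx2⟩ <;> rcases h with h | ⟨h1, h2⟩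
  · exact Or.inl (hx.trans h)
  · exact Or.inl (h1 ▸ hx)
  · exact Or.inl (hx1 ▸ h)
  · exact Or.inr ⟨hx1.trans h1, hx2.trans h2⟩

theorem rnk_lt_length (o : List Int) {i : Nat} (hi : i < o.length) : rnk o i < o.length := by
  unfold rnk
  rcases Nat.lt_or_ge ((List.range o.length).countP (fun j => ltb o j i)) o.length with h | h
  · exact h
  · exfalso
    have hle := List.countP_le_length (l := List.range o.length) (p := fun j => ltb o j i)
    rw [List.length_range] at hle
    have heq : (List.range o.length).countP (fun j => ltb o j i) = (List.range o.length).length := by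
      rw [List.length_range]; omega
    have := (List.countP_eq_length (p := fun j => ltb o j i)).mp heq i (List.mem_range.mpr hi)
    simp [ltb_irrefl] at this

theorem rnk_inj (o : List Int) {j i : Nat} (hj : j < o.length) (hi : i < o.length)
    (h : rnk o j = rnk o i) : j = i := by
  by_contra hne
  rcases ltb_total o hne with hlt | hlt
  · exact absurd h (Nat.ne_of_lt (rnk_lt_of_ltb o hj hlt))
  · exact absurd h.symm (Nat.ne_of_lt (rnk_lt_of_ltb o hi hlt))

theorem rnk_surj (o : List Int) {t : Nat} (ht : t < o.length) :
    ∃ j, j < o.length ∧ rnk o j = t := by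
  have hinj : Function.Injective
      (fun i : Fin o.length => (⟨rnk o i, rnk_lt_length o i.2⟩ : Fin o.length)) := by
    intro a b hab
    exact Fin.ext (rnk_inj o a.2 b.2 (congrArg Fin.val hab))
  obtain ⟨j, hjeq⟩ := Finite.surjective_of_injective hinj ⟨t, ht⟩
  exact ⟨j.1, j.2, congrArg Fin.val hjeq⟩

theorem foldl_const_iterate {α : Type} (F : α → α) (init : α) (n : Nat) :
    (List.range n).foldl (fun s _ => F s) init = F^[n] init := by
  induction n with
  | zero => simp
  | succ n ih =>
    rw [List.range_succ, List.foldl_append, ih, Function.iterate_succ_apply']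
    simp

theorem ordLT_trans {a b c : Option Int} (h1 : ordLT a b = true) (h2 : ordLT b c = true) :
    ordLT a c = true := by
  cases a <;> cases b <;> cases c <;> simp_all [ordLT] <;> omega

theorem ordLT_false_trans {a b c : Option Int} (h1 : ordLT a b = false)
    (h2 : ordLT b c = false) : ordLT a c = false := by
  cases a <;> cases b <;> cases c <;> simp_all [ordLT] <;> omega

-- Python's min: the result is a member and nothing in the list is strictly below it
theorem pymin_foldl_mem_min (t : List (Option Int)) (x : Option Int) :
    (t.foldl (fun a b => if ordLT b a then b else a) x ∈ x :: t) ∧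
    (∀ y ∈ x :: t, ordLT y (t.foldl (fun a b => if ordLT b a then b else a) x) = false) := by
  induction t generalizing x with
  | nil =>
    refine ⟨by simp, ?_⟩
    intro y hy
    simp only [List.mem_singleton] at hy
    subst hy
    simp [ordLT_irrefl]
  | cons b t ih =>
    simp only [List.foldl_cons]
    by_cases hb : ordLT b x = true
    · obtain ⟨hmem, hmin⟩ := ih b
      rw [if_pos hb]
      refine ⟨List.mem_cons_of_mem x hmem, ?_⟩
      intro y hy
      rcases List.mem_cons.mp hy with h | hy'
      · rw [h]
        by_contra hxr
        rw [Bool.not_eq_false] at hxr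
        have := ordLT_trans hb hxr
        rw [hmin b (List.mem_cons_self ..)] at this
        exact Bool.false_ne_true this
      · exact hmin y hy'
    · have hb' : ordLT b x = false := by revert hb; cases ordLT b x <;> simp
      obtain ⟨hmem, hmin⟩ := ih x
      rw [if_neg hb]
      refine ⟨?_, ?_⟩
      · rcases List.mem_cons.mp hmem with h | h
        · rw [h]
          exact List.mem_cons_self ..
        · exact List.mem_cons_of_mem _ (List.mem_cons_of_mem _ h)
      · intro y hy
        rcases List.mem_cons.mp hy with h | hy'
        · rw [h]
          exact hmin x (List.mem_cons_self ..)
        · rcases List.mem_cons.mp hy' with h | hy''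
          · rw [h]
            exact ordLT_false_trans hb' (hmin x (List.mem_cons_self ..))
          · exact hmin y (List.mem_cons_of_mem _ hy'')

theorem pymin_mem {l : List (Option Int)} (h : l ≠ []) : pymin l ∈ l := by
  cases l with
  | nil => exact absurd rfl h
  | cons x t => exact (pymin_foldl_mem_min t x).1

theorem pymin_isMin {l : List (Option Int)} (h : l ≠ []) :
    ∀ y ∈ l, ordLT y (pymin l) = false := by
  cases l with
  | nil => exact absurd rfl h
  | cons x t => exact (pymin_foldl_mem_min t x).2

-- the key round lemma: one step of A advances the masked state by one rank
theorem stepA_mask (o : List Int) {t : Nat} (ht : t < o.length) :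
    stepA (mask o t, marks o t, (t : Int) + 1) = (mask o (t + 1), marks o (t + 1), (t : Int) + 1 + 1) := by
  obtain ⟨p, hp, hrp⟩ := rnk_surj o ht
  have hlenm : (mask o t).length = o.length := by simp [mask]
  have hmaskp : (mask o t)[p]'(by omega) = some (o.getD p 0) := by
    simp [mask, hp, hrp]
  -- nothing in mask o t is strictly below o[p]
  have hmin : ∀ y ∈ mask o t, ordLT y (some (o.getD p 0)) = false := by
    intro y hy
    simp only [mask, List.mem_map, List.mem_range] at hy
    obtain ⟨j, hj, rfl⟩ := hy
    by_cases hrj : rnk o j < t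
    · simp [hrj, ordLT]
    · simp only [hrj, if_false]
      by_contra hlt
      rw [Bool.not_eq_false] at hlt
      have hlt' : o.getD j 0 < o.getD p 0 := by simpa [ordLT] using hlt
      have hltb : ltb o j p = true := by
        unfold ltb
        rw [Bool.or_eq_true, decide_eq_true_eq]
        exact Or.inl hlt'
      have := rnk_lt_of_ltb o hj hltb
      omega
  have hmem : some (o.getD p 0) ∈ mask o t := by
    rw [← hmaskp]; exact List.getElem_mem _
  have hne : mask o t ≠ [] := List.ne_nil_of_mem hmem
  -- min is exactly o[p]
  have hminval : pymin (mask o t) = some (o.getD p 0) := by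
    have h1 := pymin_isMin hne (some (o.getD p 0)) hmem
    have h2 := hmin (pymin (mask o t)) (pymin_mem hne)
    exact ordLT_antisymm h2 h1
  -- first index of o[p] in mask o t is p
  have hnotbefore : ∀ j (hjp : j < p), (mask o t)[j]'(by rw [hlenm]; omega) ≠ some (o.getD p 0) := by
    intro j hjp heq
    have hj : j < o.length := hjp.trans hp
    simp only [mask, List.getElem_map, List.getElem_range] at heq
    by_cases hrj : rnk o j < t
    · simp [hrj] at heq
    · simp only [hrj, if_false, Option.some_inj] at heq
      have hltb : ltb o j p = true := by
        unfold ltb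
        rw [Bool.or_eq_true, Bool.and_eq_true, beq_iff_eq]
        exact Or.inr ⟨by simpa [List.getD_eq_getElem?_getD] using heq, decide_eq_true hjp⟩
      have := rnk_lt_of_ltb o hj hltb
      omega
  have hidx : PySem.List.index? (mask o t) (some (o.getD p 0)) = some p := by
    rw [PySem.List.index?_eq_some_iff]
    refine ⟨(mask o t).take p, (mask o t).drop (p + 1), ?_, ?_, ?_⟩
    · conv_lhs => rw [← List.take_append_drop p (mask o t)]
      congr 1
      rw [List.drop_eq_getElem_cons (by omega), hmaskp]
    · simp only [List.length_take, hlenm]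
      omega
    · intro hmem'
      obtain ⟨j, hj, hjval⟩ := List.mem_iff_getElem.mp hmem'
      have hjp : j < p := by
        have := hj
        simp only [List.length_take, hlenm] at this
        omega
      exact hnotbefore j hjp (by rw [← hjval, List.getElem_take])
  -- the two set-updates produce the next masked state
  have hnext : ∀ j, j < o.length → j ≠ p → (rnk o j < t + 1 ↔ rnk o j < t) := by
    intro j hj hjp
    constructor
    · intro h
      rcases Nat.lt_succ_iff_lt_or_eq.mp h with h | h
      · exact h
      · exact absurd (rnk_inj o hj hp (h.trans hrp.symm)) hjp
    · omega
  have hpointm : (mask o t).set p none = mask o (t + 1) := by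
    apply List.ext_getElem (by simp [mask])
    intro j h1 h2
    simp only [mask, List.length_map, List.length_range] at h2
    by_cases hjp : j = p
    · subst hjp
      rw [List.getElem_set, if_pos rfl]
      simp [mask, hrp]
    · rw [List.getElem_set, if_neg (by omega)]
      simp only [mask, List.getElem_map, List.getElem_range]
      rw [if_congr ((hnext j h2 hjp)).symm rfl rfl]
  have hpointa : (marks o t).set p ((t : Int) + 1) = marks o (t + 1) := by
    apply List.ext_getElem (by simp [marks])
    intro j h1 h2
    simp only [marks, List.length_map, List.length_range] at h2
    by_cases hjp : j = p
    · subst hjp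
      rw [List.getElem_set, if_pos rfl]
      simp [marks, hrp]
    · rw [List.getElem_set, if_neg (by omega)]
      simp only [marks, List.getElem_map, List.getElem_range]
      rw [if_congr ((hnext j h2 hjp)).symm rfl rfl]
  simp only [stepA, hminval, hidx, Option.getD_some, hpointm, hpointa]

theorem iterate_stepA (o : List Int) (t : Nat) (ht : t ≤ o.length) :
    stepA^[t] (mask o 0, marks o 0, 1) = (mask o t, marks o t, (t : Int) + 1) := by
  induction t with
  | zero => simp
  | succ t ih =>
    rw [Function.iterate_succ_apply', ih (Nat.le_of_succ_le ht),
      stepA_mask o (Nat.lt_of_succ_le ht)]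
    have hc : ((t : Int) + 1 + 1) = (((t + 1 : Nat) : Int) + 1) := by push_cast; ring
    rw [hc]

theorem mask_zero (o : List Int) : mask o 0 = o.map (fun x => some x) := by
  unfold mask
  simp only [Nat.not_lt_zero, if_false]
  rw [show (fun j => some (o.getD j 0)) = (fun x => some x) ∘ (fun j => o.getD j 0) from rfl,
    ← List.map_map, map_getD_range]

theorem marks_zero (o : List Int) : marks o 0 = (List.range o.length).map (fun _ => 0) := by
  simp [marks]

-- disjoint boolean predicates: countP splits
theorem countP_or_disjoint {α : Type} (l : List α) (p q : α → Bool)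
    (h : ∀ x ∈ l, ¬(p x = true ∧ q x = true)) :
    l.countP (fun x => p x || q x) = l.countP p + l.countP q := by
  induction l with
  | nil => simp
  | cons a l ih =>
    have ha := h a (List.mem_cons_self ..)
    have hl := ih (fun x hx => h x (List.mem_cons_of_mem _ hx))
    by_cases hpa : p a = true <;> by_cases hqa : q a = true <;>
      simp_all [List.countP_cons] <;> omega

theorem rnk_split (o : List Int) {i : Nat} (hi : i < o.length) :
    rnk o i = o.countP (fun x => x < o.getD i 0)
      + (o.take i).countP (fun x => x == o.getD i 0) := by
  unfold rnk ltb
  rw [countP_or_disjoint _ _ _ (by intro x _ h; simp at h; omega)]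
  congr 1
  · rw [show (fun j => decide (o.getD j 0 < o.getD i 0)) =
        (fun x => decide (x < o.getD i 0)) ∘ (fun j => o.getD j 0) from rfl,
      ← List.countP_map, map_getD_range]
  · have hstep : (List.range o.length).countP (fun j => o.getD j 0 == o.getD i 0 && decide (j < i))
        = (List.range i).countP (fun j => o.getD j 0 == o.getD i 0) := by
      rw [show o.length = i + (o.length - i) from by omega, List.range_add,
        List.countP_append]
      have h2 : (List.countP (fun j => o.getD j 0 == o.getD i 0 && decide (j < i))
          ((List.range (o.length - i)).map (fun x => i + x))) = 0 := by
        rw [List.countP_eq_zero]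
        intro j hj
        simp only [List.mem_map, List.mem_range] at hj
        obtain ⟨k, _, rfl⟩ := hj
        simp
      rw [h2, Nat.add_zero]
      apply List.countP_congr
      intro j hj
      have : j < i := List.mem_range.mp hj
      simp [this]
    rw [hstep]
    have htake : List.take i o = (List.range i).map (fun j => o.getD j 0) := by
      calc List.take i o
          = List.take i ((List.range o.length).map (fun j => o.getD j 0)) := by
            rw [map_getD_range]
        _ = (List.take i (List.range o.length)).map (fun j => o.getD j 0) := by
            rw [List.map_take]
        _ = (List.range i).map (fun j => o.getD j 0) := by
            rw [List.take_range, Nat.min_eq_left (le_of_lt hi)]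
    rw [htake, List.countP_map]
    rfl

-- ===== VERDICT (by name: the statement is the Claim_ definition above) =====
theorem mark_letters_py_spec : Claim_equal_mark_letters_py := by
  intro key _
  unfold Spec_mark_letters_py mark_letters_py mark_letters_py_alt
  set o : List Int := key.toList.map (fun c => (c.toNat : Int)) with ho
  have hords : key.toList.map (fun c => some ((c.toNat : Int))) = mask o 0 := by
    rw [mask_zero]
    simp [ho, List.map_map]
  have hlen0 : (mask o 0).length = o.length := by simp [mask]
  have hmarks0 : (List.range o.length).map (fun (_ : Nat) => (0 : Int)) = marks o 0 :=
    (marks_zero o).symm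
  simp only [hords, hlen0]
  rw [hmarks0, foldl_const_iterate, iterate_stepA o o.length (le_refl _)]
  show marks o o.length = _
  unfold marks
  apply List.map_congr_left
  intro j hj
  have hj' : j < o.length := List.mem_range.mp hj
  rw [if_pos (rnk_lt_length o hj'), rnk_split o hj']
  push_cast
  ring
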